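-- pv_equiv track=rewrite | github.com/AIResearchNest/mad | mad/_Agents_path_bid_Full.py | _agent_goal
-- ===== SOURCE A (Python) =====
-- from typing import Dict, List, Tuple
--
-- def _agent_goal(a: Dict[str, int], resources: Dict[str, int]) -> str:
--     """
--     Decides which agent will conduct the current goal based on the agent's current available resources.
--
--     Parameters
--     ----------
--     a : Dict[str, int]
--         Dictionary containing the cost values for each agent.
--     resources : Dict[str, int]
--         Dictionary containing the available resources for each agent.
--
--     Returns
--     -------
--     name: str
--         Name of the agent assigned to each node.
--     """
--     agents = ["grace", "remus", "franklin"]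
--
--     # Assign the first three agents to the first three nodes
--     if len(a) <= 3:
--         agent_assigned = agents[len(a) - 1]
--         resources[agent_assigned] -= a[agent_assigned]
--         return agent_assigned
--
--     # Calculate the cost difference for each agent
--     cost_diff = {agent: resources[agent] - a[agent] for agent in agents}
--
--     # Sort the agents based on the cost difference in ascending order
--     sorted_agents = sorted(cost_diff, key=lambda agent: cost_diff[agent])
--
--     # Find the first agent with a non-negative cost difference
--     for agent in sorted_agents:
--         if cost_diff[agent] >= 0:
--             agent_assigned = agent
--             resources[agent_assigned] -= a[agent_assigned]
--             return agent_assigned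
--
--     # If no agent has a non-negative cost difference, choose the agent with the smallest negative cost difference
--     agent_assigned = sorted_agents[0]
--     resources[agent_assigned] -= a[agent_assigned]
--     return agent_assigned
-- ===== SOURCE B (Python) =====
-- def _agent_goal(a, resources):
--     if len(a) <= 3:
--         agent_assigned = ("grace", "remus", "franklin")[len(a) - 1]
--         resources[agent_assigned] -= a[agent_assigned]
--         return agent_assigned
--
--     # Single pass with an accumulator: rank each agent by the lexicographic key
--     # (diff < 0, diff) so every non-negative diff beats every negative one and
--     # smaller diffs win; strict '<' keeps the earliest agent on ties, matching
--     # A's stable sort.  No dict of diffs, no sort, no scan of a sorted list.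
--     best_name = None
--     best_key = None
--     for name in ("grace", "remus", "franklin"):
--         d = resources[name] - a[name]
--         key = (d < 0, d)
--         if best_name is None or key < best_key:
--             best_name, best_key = name, key
--     resources[best_name] -= a[best_name]
--     return best_name
-- ===== Notes on version B (the rewrite author's own statement) =====
-- stated objective: alternative
-- what changed: Replaces A's diff-dict + sort of all agents + scan for the first non-negative entry (with a sorted[0] fallback) by a single accumulator pass that keeps the best agent under the lexicographic key (diff<0, diff), so non-negative diffs always beat negative ones and no dict, sort or second scan is built.
import Mathlib
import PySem

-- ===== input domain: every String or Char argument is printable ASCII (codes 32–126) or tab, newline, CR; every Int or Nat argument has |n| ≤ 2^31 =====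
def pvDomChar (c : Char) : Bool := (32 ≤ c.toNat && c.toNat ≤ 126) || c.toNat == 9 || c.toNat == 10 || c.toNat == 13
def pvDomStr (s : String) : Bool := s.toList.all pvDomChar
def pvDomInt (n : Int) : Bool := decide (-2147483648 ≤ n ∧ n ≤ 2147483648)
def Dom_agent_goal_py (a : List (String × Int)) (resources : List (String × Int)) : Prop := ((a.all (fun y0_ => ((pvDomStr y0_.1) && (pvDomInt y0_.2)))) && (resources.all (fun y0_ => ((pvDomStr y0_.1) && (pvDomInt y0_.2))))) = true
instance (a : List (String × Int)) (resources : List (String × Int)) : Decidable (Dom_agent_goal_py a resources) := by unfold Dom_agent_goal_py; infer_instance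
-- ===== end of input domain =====

-- B replaces A's diff-dict + sort + first-nonnegative scan by one accumulator pass keyed by
-- (diff<0, diff); both Pythons mutate `resources` in place — the equivalence proved here is
-- about the RETURN value only.


-- the fixed agent list both Pythons share
def pvAgents : List String := ["grace", "remus", "franklin"]

-- ===== PORT A =====
def agent_goal_py (a : List (String × Int)) (resources : List (String × Int)) : String :=
  let da := PySem.Dict.ofList a
  let dr := PySem.Dict.ofList resources
  if ((da.size : Int)) ≤ 3 then
    (PySem.List.pyGet? pvAgents ((da.size : Int) - 1)).getD ""
  else
    let cost_diff : PySem.Dict String Int := pvAgents.foldl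
      (fun d ag => d.insert ag (dr.getD ag 0 - da.getD ag 0)) PySem.Dict.empty
    let sorted_agents := PySem.List.sorted cost_diff.keys (fun ag => cost_diff.getD ag 0) false
    -- the for-loop returning the first non-negative diff = find?
    match sorted_agents.find? (fun ag => decide (0 ≤ cost_diff.getD ag 0)) with
    | some ag => ag
    | none => (PySem.List.pyGet? sorted_agents 0).getD ""

-- ===== PORT B =====
-- Python's tuple comparison `key < best_key` on (bool, int), with False < True
def pvKeyLt (k1 k2 : Bool × Int) : Bool :=
  (!k1.1 && k2.1) || (k1.1 == k2.1 && decide (k1.2 < k2.2))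

def agent_goal_py_alt (a : List (String × Int)) (resources : List (String × Int)) : String :=
  let da := PySem.Dict.ofList a
  let dr := PySem.Dict.ofList resources
  if ((da.size : Int)) ≤ 3 then
    (PySem.List.pyGet? pvAgents ((da.size : Int) - 1)).getD ""
  else
    -- single pass keeping the best (name, key) seen so far; starts from None
    let best := (["grace", "remus", "franklin"] : List String).foldl
      (fun (acc : Option (String × Bool × Int)) name =>
        let d := dr.getD name 0 - da.getD name 0
        let key := (decide (d < 0), d)
        match acc with
        | none => some (name, key)
        | some (_, bk) => if pvKeyLt key bk then some (name, key) else acc)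
      none
    match best with
    | some (n, _) => n
    | none => ""

-- ===== PRECONDITION & SPEC =====
-- Pre_ excludes exactly the inputs where Python A raises a KeyError: in the ≤3 branch the
-- agent chosen by position must be a key of both dicts, in the >3 branch all three agents must be.
def Pre_agent_goal_py (a : List (String × Int)) (resources : List (String × Int)) : Prop :=
  (let da := PySem.Dict.ofList a
   let dr := PySem.Dict.ofList resources
   if ((da.size : Int)) ≤ 3 then
     (PySem.List.pyGet? pvAgents ((da.size : Int) - 1)).any
       (fun ag => da.contains ag && dr.contains ag)
   else pvAgents.all (fun ag => da.contains ag && dr.contains ag)) = true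
instance (a : List (String × Int)) (resources : List (String × Int)) : Decidable (Pre_agent_goal_py a resources) := by unfold Pre_agent_goal_py; infer_instance

def pvWitness_agent_goal_py : (List (String × Int)) × (List (String × Int)) :=
  ([("grace", 1)], [("grace", 5)])

def Spec_agent_goal_py (a : List (String × Int)) (resources : List (String × Int)) (out : String) : Prop := out = agent_goal_py_alt a resources
instance (a : List (String × Int)) (resources : List (String × Int)) (out : String) : Decidable (Spec_agent_goal_py a resources out) := by unfold Spec_agent_goal_py; infer_instance

-- ===== CLAIM (what is proved, stated in full; the proofs are below) =====
def Claim_equal_agent_goal_py : Prop := ∀ (a : List (String × Int)) (resources : List (String × Int)), Dom_agent_goal_py a resources → Pre_agent_goal_py a resources → Spec_agent_goal_py a resources (agent_goal_py a resources)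

-- ===== LEMMAS AND PROOFS =====

theorem pv_neg_decide (x : Int) : decide (x < 0) = !decide (0 ≤ x) := by
  by_cases h : 0 ≤ x <;> simp [h] <;> omega

-- the whole >3 branch, as a function of the three cost differences
set_option maxHeartbeats 4000000 in
theorem pv_select_eq (g r f : Int) :
    (let cost_diff := (PySem.Dict.mk [("grace", g), ("remus", r), ("franklin", f)] :
        PySem.Dict String Int)
     let sorted_agents := PySem.List.sorted cost_diff.keys (fun ag => cost_diff.getD ag 0) false
     match sorted_agents.find? (fun ag => decide (0 ≤ cost_diff.getD ag 0)) with
     | some ag => ag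
     | none => (PySem.List.pyGet? sorted_agents 0).getD "")
    =
    (let best := (["grace", "remus", "franklin"] : List String).foldl
      (fun (acc : Option (String × Bool × Int)) name =>
        let d := (if name = "grace" then g else if name = "remus" then r else f)
        let key := (decide (d < 0), d)
        match acc with
        | none => some (name, key)
        | some (_, bk) => if pvKeyLt key bk then some (name, key) else acc)
      none
     match best with
     | some (n, _) => n
     | none => "") := by
  by_cases hg : 0 ≤ g <;> by_cases hr : 0 ≤ r <;> by_cases hf : 0 ≤ f <;>
    by_cases h1 : r < g <;> by_cases h2 : f < g <;> by_cases h3 : f < r <;>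
    by_cases h4 : g < r <;> by_cases h5 : g < f <;> by_cases h6 : r < f <;>
    simp [PySem.List.sorted, PySem.List.insertBy, pvKeyLt, pv_neg_decide,
      PySem.Dict.getD, PySem.Dict.get?, PySem.Dict.keys,
      hg, hr, hf, h1, h2, h3, h4, h5, h6] <;> omega

-- ===== VERDICT (by name: the statement is the Claim_ definition above) =====
theorem agent_goal_py_spec : Claim_equal_agent_goal_py := by
  intro a resources _ _
  unfold Spec_agent_goal_py agent_goal_py agent_goal_py_alt
  by_cases h : ((PySem.Dict.ofList a).size : Int) ≤ 3
  · simp only [h, if_true]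
  · simp only [h, if_false]
    have := pv_select_eq ((PySem.Dict.ofList resources).getD "grace" 0 - (PySem.Dict.ofList a).getD "grace" 0)
      ((PySem.Dict.ofList resources).getD "remus" 0 - (PySem.Dict.ofList a).getD "remus" 0)
      ((PySem.Dict.ofList resources).getD "franklin" 0 - (PySem.Dict.ofList a).getD "franklin" 0)
    simpa [pvAgents, List.foldl, PySem.Dict.empty, PySem.Dict.insert] using this
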